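-- pv_equiv track=rewrite | github.com/Byeolsi/Algorithm | BJ_1202_보석도둑/main.py | solution
-- ===== SOURCE A (Python) =====
-- import heapq
--
-- def solution(jewels: list[list[int]], bags: list[int]) -> int:
--     answer = 0
--
--     # 보석과 가방을 무게 기준으로 오름차순 정렬
--     jewels.sort(key=lambda x: (x[0], x[1]))
--     bags.sort()
--
--     # 가장 적은 용량의 가방부터 시작
--     # 현재 가방에 들어갈 수 있는 모든 보석을 우선순위 큐에 삽입
--     # 우선순위 큐에 보석을 삽입할 때에는 가치 기준으로 내림차순 정렬
--     # 그리고 우선순위 큐에서 가장 가치있는 보석 추출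
--     pq = []
--     index = 0
--     for c in bags:
--         while index < len(jewels) and c >= jewels[index][0]:
--             m, v = jewels[index]
--             heapq.heappush(pq, (-v, m))
--             index += 1
--
--         if pq:
--             nega_v, m = heapq.heappop(pq)
--             answer += (-1) * nega_v
--
--     return answer
-- ===== SOURCE B (Python) =====
-- def solution(jewels: list[list[int]], bags: list[int]) -> int:
--     # Same in-place sorts as the original (observable mutation preserved).
--     jewels.sort(key=lambda x: (x[0], x[1]))
--     bags.sort()
--
--     answer = 0
--     avail = []  # values of the jewels that fit into some bag seen so far
--     i = 0
--     for c in bags: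
--         while i < len(jewels) and jewels[i][0] <= c:
--             avail.append(jewels[i][1])
--             i += 1
--         if avail:
--             best = max(avail)
--             avail.remove(best)
--             answer += best
--     return answer
-- ===== Notes on version B (the rewrite author's own statement) =====
-- stated objective: simpler
-- what changed: B drops heapq entirely: instead of a binary heap of (-value, weight) pairs it keeps a plain list of the available jewel values and picks each bag's jewel with max()/remove(), so no heap order and no weights are maintained in the queue state.
import Mathlib
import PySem

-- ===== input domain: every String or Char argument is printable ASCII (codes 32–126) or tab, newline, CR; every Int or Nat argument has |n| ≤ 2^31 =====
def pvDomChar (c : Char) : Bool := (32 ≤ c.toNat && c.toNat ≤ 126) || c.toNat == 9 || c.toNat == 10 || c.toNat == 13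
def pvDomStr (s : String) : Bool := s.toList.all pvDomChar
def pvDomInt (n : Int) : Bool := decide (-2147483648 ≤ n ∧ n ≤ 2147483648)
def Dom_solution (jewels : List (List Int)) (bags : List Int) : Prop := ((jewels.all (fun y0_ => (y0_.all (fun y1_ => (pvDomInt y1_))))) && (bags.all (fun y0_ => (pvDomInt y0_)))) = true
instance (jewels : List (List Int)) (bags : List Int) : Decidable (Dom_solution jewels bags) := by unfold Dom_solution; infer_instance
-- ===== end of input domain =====

-- B replaces A's heapq priority queue by a plain list of values scanned with max/remove
-- (simpler, no heap); both Pythons sort `jewels` and `bags` in place identically, the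
-- theorems below are about the RETURN value.

-- ===== PORT A =====
-- Python tuple '<' on int pairs: lexicographic strict comparison (exact).
def pairLt (x y : Int × Int) : Bool := x.1 < y.1 || (x.1 == y.1 && x.2 < y.2)

-- hand port of heapq._siftdown (CPython Lib/heapq.py), exact on every input: newitem is
-- threaded as a parameter instead of being stored at heap[pos] first — heap[pos] is never
-- read before it is overwritten, so the array contents agree at every step.
def siftdown (heap : List (Int × Int)) (startpos pos : Nat) (newitem : Int × Int) :
    List (Int × Int) :=
  if _h : startpos < pos then
    let parentpos := (pos - 1) / 2
    let parent := heap.getD parentpos (0, 0)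
    if pairLt newitem parent then
      siftdown (heap.set pos parent) startpos parentpos newitem
    else heap.set pos newitem
  else heap.set pos newitem
termination_by pos
decreasing_by exact Nat.lt_of_le_of_lt (Nat.div_le_self _ _) (by omega)

-- hand port of heapq._siftup (CPython Lib/heapq.py), exact: same newitem threading;
-- endpos = len(heap) is constant (only in-place sets happen).
def siftup (heap : List (Int × Int)) (pos : Nat) (newitem : Int × Int) : List (Int × Int) :=
  if _hc : 2 * pos + 1 < heap.length then
    let childpos := 2 * pos + 1
    let rightpos := childpos + 1
    let cp := if rightpos < heap.length &&
                 !(pairLt (heap.getD childpos (0, 0)) (heap.getD rightpos (0, 0)))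
              then rightpos else childpos
    siftup (heap.set pos (heap.getD cp (0, 0))) cp newitem
  else siftdown heap 0 pos newitem
termination_by heap.length - pos
decreasing_by simp only [List.length_set]; split <;> omega

-- heapq.heappush: heap.append(item); _siftdown(heap, 0, len(heap)-1)  (newitem = item)
def heappush (heap : List (Int × Int)) (item : Int × Int) : List (Int × Int) :=
  siftdown (heap ++ [item]) 0 heap.length item

-- heapq.heappop: lastelt = heap.pop() (IndexError = none on empty); if heap:
-- returnitem = heap[0]; heap[0] = lastelt; _siftup(heap, 0) (newitem = heap[0] = lastelt)
def heappop? (heap : List (Int × Int)) : Option ((Int × Int) × List (Int × Int)) :=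
  match heap.getLast?, heap.dropLast with
  | none, _ => none
  | some lastelt, [] => some (lastelt, [])
  | some lastelt, r0 :: rest => some (r0, siftup ((r0 :: rest).set 0 lastelt) 0 lastelt)

-- the inner 'while index < len(jewels) and c >= jewels[index][0]' of A;
-- jewels[index] / j[0] / j[1] via getD are exact under Pre_ (index in range, len(j) = 2).
def pushLoop (jewels : List (List Int)) (c : Int) (pq : List (Int × Int)) (index : Nat) :
    List (Int × Int) × Nat :=
  if h : index < jewels.length ∧ c ≥ PySem.List.pyGetD (jewels.getD index []) 0 0 then
    let j := jewels.getD index []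
    let m := PySem.List.pyGetD j 0 0
    let v := PySem.List.pyGetD j 1 0
    pushLoop jewels c (heappush pq (-v, m)) (index + 1)
  else (pq, index)
termination_by jewels.length - index
decreasing_by omega

def solution (jewels : List (List Int)) (bags : List Int) : Int :=
  -- jewels.sort(key=lambda x: (x[0], x[1])); bags.sort()
  let js := PySem.List.sorted2 jewels
      (fun x => PySem.List.pyGetD x 0 0) (fun x => PySem.List.pyGetD x 1 0) false
  let bs := PySem.List.sorted bags (fun x => x) false
  (bs.foldl (fun (st : Int × List (Int × Int) × Nat) c =>
      let (answer, pq, index) := st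
      let (pq, index) := pushLoop js c pq index
      -- 'if pq:' then heappop; heappop? is none exactly on the empty heap
      match heappop? pq with
      | none => (answer, pq, index)
      | some (it, pq') => (answer + (-1) * it.1, pq', index))
    (0, [], 0)).1

-- ===== PORT B =====
-- the inner while of B: collect the VALUES of the jewels that fit
def fillLoop (jewels : List (List Int)) (c : Int) (avail : List Int) (i : Nat) :
    List Int × Nat :=
  if h : i < jewels.length ∧ PySem.List.pyGetD (jewels.getD i []) 0 0 ≤ c then
    fillLoop jewels c (avail ++ [PySem.List.pyGetD (jewels.getD i []) 1 0]) (i + 1)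
  else (avail, i)
termination_by jewels.length - i
decreasing_by omega

def solution_alt (jewels : List (List Int)) (bags : List Int) : Int :=
  let js := PySem.List.sorted2 jewels
      (fun x => PySem.List.pyGetD x 0 0) (fun x => PySem.List.pyGetD x 1 0) false
  let bs := PySem.List.sorted bags (fun x => x) false
  (bs.foldl (fun (st : Int × List Int × Nat) c =>
      let (answer, avail, i) := st
      let (avail, i) := fillLoop js c avail i
      -- 'if avail:' (max? is none exactly on []); best = max(avail); avail.remove(best)
      match PySem.List.max? avail (fun y => y) with
      | none => (answer, avail, i)
      | some best => (answer + best, (PySem.List.remove? avail best).getD [], i))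
    (0, [], 0)).1

-- ===== PRECONDITION & SPEC =====
-- Pre_ excludes exactly the inputs on which Python A raises: a jewel shorter than 2 entries
-- (IndexError in the sort key), or a jewel of length ≠ 2 that fits under some bag
-- (ValueError unpacking 'm, v = jewels[index]' once the while loop reaches it).
def Pre_solution (jewels : List (List Int)) (bags : List Int) : Prop :=
  ∀ j ∈ jewels, 2 ≤ j.length ∧
    (j.length = 2 ∨ ∀ c ∈ bags, c < PySem.List.pyGetD j 0 0)
instance (jewels : List (List Int)) (bags : List Int) : Decidable (Pre_solution jewels bags) := by
  unfold Pre_solution; infer_instance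

def pvWitness_solution : List (List Int) × List Int := ([[1, 2], [3, 4]], [2, 5])

def Spec_solution (jewels : List (List Int)) (bags : List Int) (out : Int) : Prop :=
  out = solution_alt jewels bags
instance (jewels : List (List Int)) (bags : List Int) (out : Int) :
    Decidable (Spec_solution jewels bags out) := by unfold Spec_solution; infer_instance

-- ===== CLAIM (what is proved, stated in full; the proofs are below) =====
def Claim_equal_solution : Prop := ∀ (jewels : List (List Int)) (bags : List Int),
  Dom_solution jewels bags → Pre_solution jewels bags →
  Spec_solution jewels bags (solution jewels bags)

-- ===== LEMMAS AND PROOFS =====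

-- x ≤ y in Python's tuple order
def pLe (x y : Int × Int) : Prop := pairLt y x = false

theorem pLe_refl (x : Int × Int) : pLe x x := by
  simp [pLe, pairLt]

theorem pLe_of_lt {x y : Int × Int} (h : pairLt x y = true) : pLe x y := by
  simp only [pLe, pairLt, Bool.or_eq_true, Bool.or_eq_false_iff, Bool.and_eq_true,
    Bool.and_eq_false_iff, decide_eq_true_eq, decide_eq_false_iff_not, beq_iff_eq,
    beq_eq_false_iff_ne] at *
  omega

theorem pLe_trans {x y z : Int × Int} (h1 : pLe x y) (h2 : pLe y z) : pLe x z := by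
  simp only [pLe, pairLt, Bool.or_eq_false_iff, Bool.and_eq_false_iff,
    decide_eq_false_iff_not, beq_eq_false_iff_ne] at *
  omega

theorem pLe_fst {x y : Int × Int} (h : pLe x y) : x.1 ≤ y.1 := by
  simp only [pLe, pairLt, Bool.or_eq_false_iff, Bool.and_eq_false_iff,
    decide_eq_false_iff_not, beq_eq_false_iff_ne] at h
  omega

-- heap-order invariant of A's array
def HeapInv (h : List (Int × Int)) : Prop :=
  ∀ i, 0 < i → i < h.length → pLe (h.getD ((i - 1) / 2) (0, 0)) (h.getD i (0, 0))

theorem getD_set_self {h : List (Int × Int)} {i : Nat} (hi : i < h.length) (x : Int × Int) :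
    (h.set i x).getD i (0, 0) = x := by
  simp [List.getD_eq_getElem?_getD, hi]

theorem getD_set_ne {h : List (Int × Int)} {i j : Nat} (hij : i ≠ j) (x : Int × Int) :
    (h.set i x).getD j (0, 0) = h.getD j (0, 0) := by
  simp [List.getD_eq_getElem?_getD, List.getElem?_set_ne hij]

theorem perm_set : ∀ (h : List (Int × Int)) (i : Nat), i < h.length → ∀ (x : Int × Int),
    (h.getD i (0, 0) :: h.set i x).Perm (x :: h) := by
  intro h
  induction h with
  | nil => intro i hi; simp at hi
  | cons a t ih =>
    intro i hi x
    cases i with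
    | zero => simpa using List.Perm.swap x a t
    | succ n =>
      simp only [List.set_cons_succ, List.getD_cons_succ]
      exact (List.Perm.swap a _ _).trans (((ih n (by simpa using hi) x).cons a).trans
        (List.Perm.swap x a t))

theorem mset_set {h : List (Int × Int)} {i : Nat} (hi : i < h.length) (x : Int × Int) :
    h.getD i (0, 0) ::ₘ (↑(h.set i x) : Multiset (Int × Int)) = x ::ₘ ↑h := by
  exact_mod_cast Multiset.coe_eq_coe.mpr (perm_set h i hi x)

theorem mset_set_set {h : List (Int × Int)} {a b : Nat} (ha : a < h.length)
    (hb : b < h.length) (hab : a ≠ b) (x : Int × Int) :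
    (↑((h.set a (h.getD b (0, 0))).set b x) : Multiset (Int × Int)) = ↑(h.set a x) := by
  have hgb : (h.set a (h.getD b (0, 0))).getD b (0, 0) = h.getD b (0, 0) :=
    getD_set_ne hab _
  have h1 := mset_set (h := h.set a (h.getD b (0, 0))) (i := b) (by simpa using hb) x
  rw [hgb] at h1
  have h2 := mset_set (h := h) (i := a) ha (h.getD b (0, 0))
  have h3 := mset_set (h := h) (i := a) ha x
  have key : h.getD a (0, 0) ::ₘ h.getD b (0, 0) ::ₘ
        (↑((h.set a (h.getD b (0, 0))).set b x) : Multiset (Int × Int)) =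
      h.getD a (0, 0) ::ₘ h.getD b (0, 0) ::ₘ (↑(h.set a x) : Multiset (Int × Int)) := by
    rw [h1, Multiset.cons_swap (h.getD a (0, 0)) x, h2,
      Multiset.cons_swap x (h.getD b (0, 0)), ← h3,
      Multiset.cons_swap (h.getD b (0, 0)) (h.getD a (0, 0))]
  exact (Multiset.cons_inj_right _).mp ((Multiset.cons_inj_right _).mp key)

theorem siftdown_spec : ∀ (pos : Nat) (h : List (Int × Int)) (item : Int × Int),
    pos < h.length →
    (∀ i, 0 < i → i < h.length → i ≠ pos → (i - 1) / 2 ≠ pos →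
      pLe (h.getD ((i - 1) / 2) (0, 0)) (h.getD i (0, 0))) →
    (∀ j, 0 < j → j < h.length → (j - 1) / 2 = pos → pLe item (h.getD j (0, 0))) →
    (0 < pos → ∀ j, 0 < j → j < h.length → (j - 1) / 2 = pos →
      pLe (h.getD ((pos - 1) / 2) (0, 0)) (h.getD j (0, 0))) →
    HeapInv (siftdown h 0 pos item) ∧
      (↑(siftdown h 0 pos item) : Multiset (Int × Int)) = ↑(h.set pos item) := by
  intro pos
  induction pos using Nat.strong_induction_on with
  | _ pos ih =>
    intro h item hpos H1 H2 H3
    rw [siftdown.eq_def]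
    by_cases h0 : 0 < pos
    · rw [dif_pos h0]
      dsimp only
      by_cases hlt : pairLt item (h.getD ((pos - 1) / 2) (0, 0)) = true
      · rw [if_pos hlt]
        have hplt : (pos - 1) / 2 < pos := by omega
        have hpne : (pos - 1) / 2 ≠ pos := by omega
        have hplen : (pos - 1) / 2 < h.length := lt_trans hplt hpos
        have gne : ∀ {j : Nat}, j ≠ pos →
            (h.set pos (h.getD ((pos - 1) / 2) (0, 0))).getD j (0, 0) = h.getD j (0, 0) :=
          fun hj => getD_set_ne (fun e => hj e.symm) _
        have gpos : (h.set pos (h.getD ((pos - 1) / 2) (0, 0))).getD pos (0, 0) =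
            h.getD ((pos - 1) / 2) (0, 0) := getD_set_self hpos _
        have step := ih ((pos - 1) / 2) hplt (h.set pos (h.getD ((pos - 1) / 2) (0, 0))) item
          (by simpa using by omega)
          (by -- H1'
            intro i hi hil hine hipar
            rw [List.length_set] at hil
            by_cases hip : i = pos
            · exact absurd (by omega : (i - 1) / 2 = (pos - 1) / 2) (hip ▸ hipar)
            by_cases hcp : (i - 1) / 2 = pos
            · rw [gne hip, hcp, gpos]
              exact H3 h0 i hi hil hcp
            · rw [gne hip, gne hcp]
              exact H1 i hi hil hip hcp)
          (by -- H2'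
            intro j hj hjl hjp
            rw [List.length_set] at hjl
            by_cases hjpos : j = pos
            · rw [hjpos, gpos]
              exact pLe_of_lt hlt
            · rw [gne hjpos]
              have hb := H1 j hj hjl hjpos (by omega)
              rw [hjp] at hb
              exact pLe_trans (pLe_of_lt hlt) hb)
          (by -- H3'
            intro hpp0 j hj hjl hjp
            rw [List.length_set] at hjl
            rw [gne (by omega : ((pos - 1) / 2 - 1) / 2 ≠ pos)]
            have ha := H1 ((pos - 1) / 2) hpp0 hplen hpne (by omega)
            by_cases hjpos : j = pos
            · rw [hjpos, gpos]
              exact ha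
            · rw [gne hjpos]
              have hb := H1 j hj hjl hjpos (by omega)
              rw [hjp] at hb
              exact pLe_trans ha hb)
        refine ⟨step.1, ?_⟩
        rw [step.2, mset_set_set hpos hplen (by omega) item]
      · rw [if_neg hlt]
        refine ⟨?_, rfl⟩
        intro i hi hil
        rw [List.length_set] at hil
        by_cases hip : i = pos
        · subst hip
          rw [getD_set_self hpos, getD_set_ne (by omega : i ≠ (i - 1) / 2) item]
          exact (Bool.not_eq_true _).mp hlt
        by_cases hcp : (i - 1) / 2 = pos
        · rw [getD_set_ne (fun e => hip e.symm) item, hcp, getD_set_self hpos]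
          exact H2 i hi hil hcp
        · rw [getD_set_ne (fun e => hip e.symm) item, getD_set_ne (fun e => hcp e.symm) item]
          exact H1 i hi hil hip hcp
    · rw [dif_neg h0]
      have hp0 : pos = 0 := by omega
      subst hp0
      refine ⟨?_, rfl⟩
      intro i hi hil
      rw [List.length_set] at hil
      by_cases hcp : (i - 1) / 2 = 0
      · rw [getD_set_ne (by omega : (0 : Nat) ≠ i) item, hcp, getD_set_self hpos]
        exact H2 i hi hil hcp
      · rw [getD_set_ne (by omega : (0 : Nat) ≠ i) item, getD_set_ne (fun e => hcp e.symm) item]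
        exact H1 i hi hil (by omega) hcp

theorem root_le {h : List (Int × Int)} (hinv : HeapInv h) :
    ∀ i, i < h.length → pLe (h.getD 0 (0, 0)) (h.getD i (0, 0)) := by
  intro i
  induction i using Nat.strong_induction_on with
  | _ i ih =>
    intro hil
    rcases Nat.eq_zero_or_pos i with h0 | h0
    · subst h0; exact pLe_refl _
    · exact pLe_trans (ih ((i - 1) / 2) (by omega) (by omega)) (hinv i h0 hil)

theorem siftup_spec : ∀ (n : Nat) (h : List (Int × Int)) (pos : Nat) (item : Int × Int),
    h.length - pos = n → pos < h.length →
    (∀ i, 0 < i → i < h.length → i ≠ pos → (i - 1) / 2 ≠ pos →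
      pLe (h.getD ((i - 1) / 2) (0, 0)) (h.getD i (0, 0))) →
    (0 < pos → ∀ j, 0 < j → j < h.length → (j - 1) / 2 = pos →
      pLe (h.getD ((pos - 1) / 2) (0, 0)) (h.getD j (0, 0))) →
    HeapInv (siftup h pos item) ∧
      (↑(siftup h pos item) : Multiset (Int × Int)) = ↑(h.set pos item) := by
  intro n
  induction n using Nat.strong_induction_on with
  | _ n ih =>
    intro h pos item hn hpos W1 W2
    rw [siftup.eq_def]
    by_cases hc : 2 * pos + 1 < h.length
    · rw [dif_pos hc]
      dsimp only
      set cp := (if (decide (2 * pos + 1 + 1 < h.length) &&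
          !pairLt (h.getD (2 * pos + 1) (0, 0)) (h.getD (2 * pos + 1 + 1) (0, 0))) = true
        then 2 * pos + 1 + 1 else 2 * pos + 1) with hcp
      have hcpr : 2 * pos + 1 ≤ cp ∧ cp ≤ 2 * pos + 2 ∧ cp < h.length := by
        rw [hcp]; split
        · next hh =>
            simp only [Bool.and_eq_true, decide_eq_true_eq] at hh
            omega
        · omega
      have hminchild : ∀ j, 0 < j → j < h.length → (j - 1) / 2 = pos →
          pLe (h.getD cp (0, 0)) (h.getD j (0, 0)) := by
        intro j hj hjl hjp
        have hj12 : j = 2 * pos + 1 ∨ j = 2 * pos + 1 + 1 := by omega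
        rw [hcp]
        split
        · next hh =>
            simp only [Bool.and_eq_true, decide_eq_true_eq, Bool.not_eq_true'] at hh
            rcases hj12 with hj1 | hj1 <;> subst hj1
            · exact hh.2
            · exact pLe_refl _
        · next hh =>
            simp only [Bool.and_eq_true, decide_eq_true_eq, Bool.not_eq_true', not_and,
              Bool.not_eq_false] at hh
            rcases hj12 with hj1 | hj1 <;> subst hj1
            · exact pLe_refl _
            · exact pLe_of_lt (hh (by omega))
      have hpc : pos ≠ cp := by omega
      have gne : ∀ {j : Nat}, j ≠ pos →
          (h.set pos (h.getD cp (0, 0))).getD j (0, 0) = h.getD j (0, 0) :=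
        fun hj => getD_set_ne (fun e => hj e.symm) _
      have gpos : (h.set pos (h.getD cp (0, 0))).getD pos (0, 0) = h.getD cp (0, 0) :=
        getD_set_self hpos _
      have step := ih (h.length - cp) (by omega) (h.set pos (h.getD cp (0, 0))) cp item
        (by simp) (by simpa using hcpr.2.2)
        (by -- W1'
          intro i hi hil hine hipar
          rw [List.length_set] at hil
          by_cases hip : i = pos
          · subst hip
            rw [gne (by omega : (i - 1) / 2 ≠ i), gpos]
            exact W2 hi cp (by omega) hcpr.2.2 (by omega)
          by_cases hchild : (i - 1) / 2 = pos
          · rw [gne hip, hchild, gpos]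
            exact hminchild i hi hil hchild
          · rw [gne hip, gne hchild]
            exact W1 i hi hil hip hchild)
        (by -- W2'
          intro hcp0 j hj hjl hjp
          rw [List.length_set] at hjl
          have hjpos : j ≠ pos := by omega
          rw [(by omega : (cp - 1) / 2 = pos), gpos, gne hjpos]
          have hb := W1 j hj hjl hjpos (by omega)
          rw [hjp] at hb
          exact hb)
      refine ⟨step.1, ?_⟩
      rw [step.2, mset_set_set hpos hcpr.2.2 hpc item]
    · rw [dif_neg hc]
      exact siftdown_spec pos h item hpos W1
        (fun j hj hjl hjp => absurd hjl (by omega))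
        (fun _ j hj hjl hjp => absurd hjl (by omega))

theorem heappush_spec {h : List (Int × Int)} (hinv : HeapInv h) (item : Int × Int) :
    HeapInv (heappush h item) ∧
      (↑(heappush h item) : Multiset (Int × Int)) = item ::ₘ ↑h := by
  have spec := siftdown_spec h.length (h ++ [item]) item (by simp)
    (by
      intro i hi hil hine hipar
      simp only [List.length_append, List.length_cons, List.length_nil] at hil
      have hi2 : i < h.length := by omega
      rw [List.getD_append _ _ _ _ hi2, List.getD_append _ _ _ _ (by omega)]
      exact hinv i hi hi2)
    (by
      intro j hj hjl hjp
      simp only [List.length_append, List.length_cons, List.length_nil] at hjl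
      exact absurd hjp (by omega))
    (by
      intro _ j hj hjl hjp
      simp only [List.length_append, List.length_cons, List.length_nil] at hjl
      exact absurd hjp (by omega))
  have hset : (h ++ [item]).set h.length item = h ++ [item] := by
    rw [List.set_append_right _ _ (Nat.le_refl _)]
    simp
  rw [hset] at spec
  refine ⟨spec.1, ?_⟩
  show (↑(siftdown (h ++ [item]) 0 h.length item) : Multiset (Int × Int)) = item ::ₘ ↑h
  rw [spec.2]
  exact_mod_cast Multiset.coe_eq_coe.mpr (List.perm_append_singleton item h)

theorem heappop_spec {h : List (Int × Int)} (hinv : HeapInv h) (hne : h ≠ []) :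
    ∃ it h', heappop? h = some (it, h') ∧ HeapInv h' ∧
      (↑h : Multiset (Int × Int)) = it ::ₘ ↑h' ∧ ∀ x ∈ h, pLe it x := by
  cases h using List.reverseRecOn with
  | nil => exact absurd rfl hne
  | append_singleton L a =>
    cases L with
    | nil =>
      refine ⟨a, [], rfl, ?_, by simp, ?_⟩
      · intro i hi hil; simp at hil
      · intro x hx
        simp only [List.nil_append, List.mem_singleton] at hx
        subst hx; exact pLe_refl _
    | cons r0 rest =>
      have hg : ∀ k, 0 < k → k < rest.length + 1 →
          (a :: rest).getD k (0, 0) = ((r0 :: rest) ++ [a]).getD k (0, 0) := by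
        intro k hk hkl
        cases k with
        | zero => omega
        | succ k' =>
          simp only [List.cons_append, List.getD_cons_succ]
          rw [List.getD_append _ _ _ _ (by omega)]
      have spec := siftup_spec ((a :: rest).length) (a :: rest) 0 a (by simp) (by simp)
        (by
          intro i hi hil hine hipar
          simp only [List.length_cons] at hil
          rw [hg i hi hil, hg ((i - 1) / 2) (by omega) (by omega)]
          exact hinv i hi (by simp; omega))
        (by intro h0; omega)
      refine ⟨r0, siftup (a :: rest) 0 a, ?_, spec.1, ?_, ?_⟩
      · show heappop? ((r0 :: rest) ++ [a]) = _
        unfold heappop?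
        rw [List.getLast?_concat, List.dropLast_concat]
        rfl
      · rw [show ((a :: rest).set 0 a) = a :: rest from rfl] at spec
        rw [spec.2]
        exact_mod_cast Multiset.coe_eq_coe.mpr ((List.perm_append_singleton a rest).cons r0)
      · intro x hx
        obtain ⟨i, hil, rfl⟩ := List.mem_iff_getElem.mp hx
        have hroot := root_le hinv i hil
        rw [List.getD_eq_getElem _ _ hil] at hroot
        rw [show ((r0 :: rest) ++ [a]).getD 0 (0, 0) = r0 from rfl] at hroot
        exact hroot

-- coupling invariant between A's heap and B's value list
def Couple (pq : List (Int × Int)) (avail : List Int) : Prop :=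
  HeapInv pq ∧
    (↑pq : Multiset (Int × Int)).map (·.1) = (↑avail : Multiset Int).map (fun v => -v)

theorem fill_couple (js : List (List Int)) (c : Int) :
    ∀ (index : Nat) (pq : List (Int × Int)) (avail : List Int), Couple pq avail →
    (pushLoop js c pq index).2 = (fillLoop js c avail index).2 ∧
      Couple (pushLoop js c pq index).1 (fillLoop js c avail index).1 := by
  suffices H : ∀ (fuel index : Nat) (pq : List (Int × Int)) (avail : List Int),
      js.length - index ≤ fuel → Couple pq avail →
      (pushLoop js c pq index).2 = (fillLoop js c avail index).2 ∧
        Couple (pushLoop js c pq index).1 (fillLoop js c avail index).1 by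
    exact fun index pq avail hC => H js.length index pq avail (by omega) hC
  intro fuel
  induction fuel with
  | zero =>
    intro index pq avail hle hC
    rw [pushLoop.eq_def, fillLoop.eq_def]
    rw [dif_neg (by omega), dif_neg (by omega)]
    exact ⟨rfl, hC⟩
  | succ f ihf =>
    intro index pq avail hle hC
    rw [pushLoop.eq_def, fillLoop.eq_def]
    by_cases hcond : index < js.length ∧ PySem.List.pyGetD (js.getD index []) 0 0 ≤ c
    · rw [dif_pos (show index < js.length ∧
          c ≥ PySem.List.pyGetD (js.getD index []) 0 0 from ⟨hcond.1, hcond.2⟩),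
        dif_pos hcond]
      dsimp only
      apply ihf (index + 1) _ _ (by omega)
      obtain ⟨hinv, hmap⟩ := hC
      obtain ⟨hinv', hmset⟩ := heappush_spec hinv
        (-(PySem.List.pyGetD (js.getD index []) 1 0), PySem.List.pyGetD (js.getD index []) 0 0)
      refine ⟨hinv', ?_⟩
      rw [hmset, Multiset.map_cons]
      have hav : (↑(avail ++ [PySem.List.pyGetD (js.getD index []) 1 0]) : Multiset Int) =
          PySem.List.pyGetD (js.getD index []) 1 0 ::ₘ ↑avail := by
        exact_mod_cast Multiset.coe_eq_coe.mpr (List.perm_append_singleton _ _)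
      rw [hav, Multiset.map_cons, hmap]
    · rw [dif_neg (fun hh => hcond ⟨hh.1, hh.2⟩), dif_neg hcond]
      exact ⟨rfl, hC⟩

theorem pop_couple {pq : List (Int × Int)} {avail : List Int} (h : Couple pq avail) :
    (pq = [] ∧ avail = []) ∨
    (∃ it pq' best, heappop? pq = some (it, pq') ∧
      PySem.List.max? avail (fun y => y) = some best ∧ (-1) * it.1 = best ∧
      Couple pq' ((PySem.List.remove? avail best).getD [])) := by
  obtain ⟨hinv, hmap⟩ := h
  by_cases hpq : pq = []
  · left
    refine ⟨hpq, ?_⟩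
    subst hpq
    have h0 : ((↑avail : Multiset Int).map (fun v => -v)) = 0 := by
      simpa using hmap.symm
    exact (Multiset.coe_eq_zero _).mp (Multiset.map_eq_zero.mp h0)
  · right
    obtain ⟨it, pq', hpop, hinv', hmset, hmin⟩ := heappop_spec hinv hpq
    have havne : avail ≠ [] := by
      intro he
      subst he
      have h0 : ((↑pq : Multiset (Int × Int)).map (·.1)) = 0 := by simpa using hmap
      exact hpq ((Multiset.coe_eq_zero _).mp (Multiset.map_eq_zero.mp h0))
    cases hm : PySem.List.max? avail (fun y => y) with
    | none => exact absurd ((PySem.List.max?_eq_none_iff _ _).mp hm) havne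
    | some best =>
      have hbmem : best ∈ avail := PySem.List.max?_mem hm
      have hbmax : ∀ y ∈ avail, y ≤ best := fun y hy => PySem.List.max?_isMax hm y hy
      have hitmem : it ∈ pq := by
        have hmem : it ∈ (↑pq : Multiset (Int × Int)) := by
          rw [hmset]; exact Multiset.mem_cons_self _ _
        exact Multiset.mem_coe.mp hmem
      have h1 : it.1 ≤ -best := by
        have hmem : (-best) ∈ (↑pq : Multiset (Int × Int)).map (·.1) := by
          rw [hmap]; exact Multiset.mem_map.mpr ⟨best, Multiset.mem_coe.mpr hbmem, rfl⟩
        obtain ⟨x, hxmem, hx1⟩ := Multiset.mem_map.mp hmem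
        rw [← hx1]
        exact pLe_fst (hmin x (Multiset.mem_coe.mp hxmem))
      have h2 : -best ≤ it.1 := by
        have hmem : it.1 ∈ (↑avail : Multiset Int).map (fun v => -v) := by
          rw [← hmap]; exact Multiset.mem_map.mpr ⟨it, Multiset.mem_coe.mpr hitmem, rfl⟩
        obtain ⟨av, hamem, ha⟩ := Multiset.mem_map.mp hmem
        rw [← ha]
        exact neg_le_neg (hbmax av (Multiset.mem_coe.mp hamem))
      have hit1 : it.1 = -best := le_antisymm h1 h2
      refine ⟨it, pq', best, hpop, rfl, by rw [hit1]; ring, hinv', ?_⟩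
      have hrem : (PySem.List.remove? avail best).getD [] = avail.erase best := by
        rw [PySem.List.remove?_eq_some_erase avail best hbmem]
        rfl
      rw [hrem]
      have hap : (↑avail : Multiset Int) = best ::ₘ ↑(avail.erase best) := by
        exact_mod_cast Multiset.coe_eq_coe.mpr (List.perm_cons_erase hbmem)
      have hkey := hmap
      rw [hmset, hap, Multiset.map_cons, Multiset.map_cons, hit1] at hkey
      exact (Multiset.cons_inj_right _).mp hkey

theorem loop_couple (js : List (List Int)) (bs : List Int) :
    ∀ (ans : Int) (pq : List (Int × Int)) (index : Nat) (avail : List Int),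
    Couple pq avail →
    (bs.foldl (fun (st : Int × List (Int × Int) × Nat) c =>
        let (answer, pq, index) := st
        let (pq, index) := pushLoop js c pq index
        match heappop? pq with
        | none => (answer, pq, index)
        | some (it, pq') => (answer + (-1) * it.1, pq', index)) (ans, pq, index)).1 =
    (bs.foldl (fun (st : Int × List Int × Nat) c =>
        let (answer, avail, i) := st
        let (avail, i) := fillLoop js c avail i
        match PySem.List.max? avail (fun y => y) with
        | none => (answer, avail, i)
        | some best => (answer + best, (PySem.List.remove? avail best).getD [], i))
      (ans, avail, index)).1 := by
  induction bs with
  | nil => intro ans pq index avail _; rfl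
  | cons c t ih =>
    intro ans pq index avail hC
    simp only [List.foldl_cons]
    obtain ⟨hidx, hC'⟩ := fill_couple js c index pq avail hC
    rcases pop_couple hC' with ⟨hpq, hav⟩ | ⟨it, pq', best, hpop, hmax, hbest, hC''⟩
    · rw [hpq, hav, hidx]
      have hpopnil : heappop? [] = none := rfl
      have hmaxnil : PySem.List.max? ([] : List Int) (fun y => y) = none := rfl
      rw [hpopnil, hmaxnil]
      exact ih ans [] ((fillLoop js c avail index).2) [] ⟨fun i h1 h2 => by simp at h2, by simp⟩
    · rw [hpop, hmax, hidx]
      dsimp only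
      rw [hbest]
      exact ih _ _ _ _ hC''

-- ===== VERDICT (by name: the statement is the Claim_ definition above) =====
theorem solution_spec : Claim_equal_solution := by
  intro jewels bags _ _
  unfold Spec_solution solution solution_alt
  exact loop_couple _ _ 0 [] 0 [] ⟨by intro i h1 h2; simp at h2, by simp⟩
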